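-- pv_equiv track=rewrite | github.com/Hamurai94/Kour_Tox_Biller | PCCompanion/krita_brush_mapper.py | _categorize_brush
-- ===== SOURCE A (Python) =====
-- from typing import Dict, List, Optional, Tuple
--
-- def _categorize_brush(name: str, tags: List[str]) -> str:
--     """Categorize brush for organization"""
--     name_lower = name.lower()
--     tags_lower = [tag.lower() for tag in tags]
--
--     if any('pencil' in tag for tag in tags_lower) or 'pencil' in name_lower:
--         return 'Pencils'
--     elif any('ink' in tag for tag in tags_lower) or 'ink' in name_lower:
--         return 'Ink'
--     elif any('water' in tag for tag in tags_lower) or 'water' in name_lower: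
--         return 'Watercolor'
--     elif any('paint' in tag for tag in tags_lower) or 'paint' in name_lower:
--         return 'Paint'
--     elif 'airbrush' in name_lower:
--         return 'Airbrush'
--     elif 'eraser' in name_lower:
--         return 'Erasers'
--     elif 'basic' in name_lower:
--         return 'Basic'
--     else:
--         return 'Other'
-- ===== SOURCE B (Python) =====
-- def _rule_idx(kws, h):
--     """Index of the first keyword occurring in h, or len(kws) if none does."""
--     for i, kw in enumerate(kws):
--         if kw in h:
--             return i
--     return len(kws)
--
-- def _categorize_brush(name, tags):
--     """Score-and-index: each haystack gets the index of its earliest-matching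
--     rule; the minimum score over all haystacks selects the category by indexing
--     a category list (no boolean branch ladder)."""
--     kws1 = ['pencil', 'ink', 'water', 'paint']
--     name_lower = name.lower()
--     haystacks = [t.lower() for t in tags] + [name_lower]
--     best = min((_rule_idx(kws1, h) for h in haystacks), default=len(kws1))
--     if best < len(kws1):
--         return ['Pencils', 'Ink', 'Watercolor', 'Paint'][best]
--     j = _rule_idx(['airbrush', 'eraser', 'basic'], name_lower)
--     return ['Airbrush', 'Erasers', 'Basic', 'Other'][j]
-- ===== Notes on version B (the rewrite author's own statement) =====
-- stated objective: alternative
-- what changed: Replaced the sequential boolean if/elif ladder by a numeric score-and-index scheme: each lowercased haystack is mapped to the index of its earliest matching keyword, the minimum index over all haystacks selects the category by list indexing (loop transposed: per-string scoring instead of per-rule any-scans).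
import Mathlib
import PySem

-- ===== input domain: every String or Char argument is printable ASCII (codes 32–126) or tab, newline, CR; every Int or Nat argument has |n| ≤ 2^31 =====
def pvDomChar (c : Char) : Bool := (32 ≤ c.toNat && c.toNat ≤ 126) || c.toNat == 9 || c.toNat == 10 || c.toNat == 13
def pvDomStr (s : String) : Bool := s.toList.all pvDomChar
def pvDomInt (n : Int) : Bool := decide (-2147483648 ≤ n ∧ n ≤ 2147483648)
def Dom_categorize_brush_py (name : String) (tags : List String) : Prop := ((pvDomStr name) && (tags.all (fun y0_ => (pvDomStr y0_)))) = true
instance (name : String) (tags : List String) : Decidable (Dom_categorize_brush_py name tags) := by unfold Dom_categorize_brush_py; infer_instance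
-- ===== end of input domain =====

-- B replaces A's boolean if/elif ladder by a score-and-index scheme (min earliest-keyword index over haystacks, category chosen by list indexing): an alternative decomposition, same cost.


-- ===== PORT A =====
def categorize_brush_py (name : String) (tags : List String) : String :=
  let name_lower := PySem.Str.lower name
  let tags_lower := tags.map (fun tag => PySem.Str.lower tag)
  if tags_lower.any (fun tag => PySem.Str.isIn "pencil" tag) || PySem.Str.isIn "pencil" name_lower then "Pencils"
  else if tags_lower.any (fun tag => PySem.Str.isIn "ink" tag) || PySem.Str.isIn "ink" name_lower then "Ink"
  else if tags_lower.any (fun tag => PySem.Str.isIn "water" tag) || PySem.Str.isIn "water" name_lower then "Watercolor"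
  else if tags_lower.any (fun tag => PySem.Str.isIn "paint" tag) || PySem.Str.isIn "paint" name_lower then "Paint"
  else if PySem.Str.isIn "airbrush" name_lower then "Airbrush"
  else if PySem.Str.isIn "eraser" name_lower then "Erasers"
  else if PySem.Str.isIn "basic" name_lower then "Basic"
  else "Other"

-- ===== PORT B =====
-- index of the first keyword occurring in h, or the list's length if none does
def pvRuleIdx : List String → String → Nat
  | [], _ => 0
  | kw :: rest, h => if PySem.Str.isIn kw h then 0 else 1 + pvRuleIdx rest h

def categorize_brush_py_alt (name : String) (tags : List String) : String :=
  let kws1 := ["pencil", "ink", "water", "paint"]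
  let name_lower := PySem.Str.lower name
  let haystacks := tags.map (fun t => PySem.Str.lower t) ++ [name_lower]
  let best := haystacks.foldl (fun a h => min a (pvRuleIdx kws1 h)) kws1.length
  if best < kws1.length then
    ["Pencils", "Ink", "Watercolor", "Paint"].getD best "Other"
  else
    ["Airbrush", "Erasers", "Basic", "Other"].getD (pvRuleIdx ["airbrush", "eraser", "basic"] name_lower) "Other"

-- ===== PRECONDITION & SPEC =====
def Spec_categorize_brush_py (name : String) (tags : List String) (out : String) : Prop := out = categorize_brush_py_alt name tags
instance (name : String) (tags : List String) (out : String) : Decidable (Spec_categorize_brush_py name tags out) := by unfold Spec_categorize_brush_py; infer_instance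

-- ===== CLAIM (what is proved, stated in full; the proofs are below) =====
def Claim_equal_categorize_brush_py : Prop := ∀ (name : String) (tags : List String), Dom_categorize_brush_py name tags → Spec_categorize_brush_py name tags (categorize_brush_py name tags)


-- ===== LEMMAS AND PROOFS =====

theorem pvRuleIdx_le (kws : List String) (h : String) : pvRuleIdx kws h ≤ kws.length := by
  induction kws with
  | nil => simp [pvRuleIdx]
  | cons kw rest ih =>
    simp only [pvRuleIdx, List.length_cons]
    split <;> omega

-- the min-fold never exceeds its accumulator
theorem pvFold_le_acc (kws : List String) (hs : List String) (acc : Nat) :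
    hs.foldl (fun a h => min a (pvRuleIdx kws h)) acc ≤ acc := by
  induction hs generalizing acc with
  | nil => simp
  | cons h hs ih =>
    simp only [List.foldl]
    exact le_trans (ih _) (by omega)

-- shift the accumulator out of the min-fold
theorem pvFold_shift (kws : List String) (hs : List String) (acc : Nat) (hacc : acc ≤ kws.length) :
    hs.foldl (fun a h => min a (pvRuleIdx kws h)) acc
      = min acc (hs.foldl (fun a h => min a (pvRuleIdx kws h)) kws.length) := by
  induction hs generalizing acc with
  | nil => simp; omega
  | cons h hs ih =>
    have hx := pvRuleIdx_le kws h
    simp only [List.foldl]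
    rw [ih (min acc (pvRuleIdx kws h)) (by omega),
        ih (min kws.length (pvRuleIdx kws h)) (by omega)]
    omega

-- fold ≤ k (for k below the initial accumulator) iff some haystack scores ≤ k
theorem pvFold_le_iff (kws : List String) (hs : List String) (k : Nat) (hk : k < kws.length) :
    (hs.foldl (fun a h => min a (pvRuleIdx kws h)) kws.length ≤ k)
      ↔ ∃ h ∈ hs, pvRuleIdx kws h ≤ k := by
  induction hs with
  | nil => simp; omega
  | cons h hs ih =>
    have hx := pvRuleIdx_le kws h
    simp only [List.foldl]
    rw [pvFold_shift kws hs (min kws.length (pvRuleIdx kws h)) (by omega)]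
    simp only [List.mem_cons]
    set F := hs.foldl (fun a h => min a (pvRuleIdx kws h)) kws.length with hF
    constructor
    · intro hle
      have hsplit : pvRuleIdx kws h ≤ k ∨ F ≤ k := by omega
      rcases hsplit with h1 | h1
      · exact ⟨h, Or.inl rfl, h1⟩
      · obtain ⟨h2, hm, hle2⟩ := ih.mp h1
        exact ⟨h2, Or.inr hm, hle2⟩
    · rintro ⟨h2, (rfl | hm), hle2⟩
      · omega
      · have := ih.mpr ⟨h2, hm, hle2⟩
        omega

-- first-group scores on the concrete keyword list
theorem pvIdx1_le_iff (h : String) (k : Nat) (hk : k < 4) :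
    (pvRuleIdx ["pencil", "ink", "water", "paint"] h ≤ k)
      ↔ ((PySem.Str.isIn "pencil" h = true)
          ∨ (1 ≤ k ∧ PySem.Str.isIn "ink" h = true)
          ∨ (2 ≤ k ∧ PySem.Str.isIn "water" h = true)
          ∨ (3 ≤ k ∧ PySem.Str.isIn "paint" h = true)) := by
  simp only [pvRuleIdx]
  split_ifs <;> simp_all <;> omega

-- ===== VERDICT (by name: the statement is the Claim_ definition above) =====
theorem categorize_brush_py_spec : Claim_equal_categorize_brush_py := by
  intro name tags _
  unfold Spec_categorize_brush_py categorize_brush_py categorize_brush_py_alt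
  simp only [show (["pencil", "ink", "water", "paint"] : List String).length = 4 from rfl]
  set nl := PySem.Str.lower name with hnl
  set hs := tags.map (fun t => PySem.Str.lower t) ++ [nl] with hhs
  set best := hs.foldl (fun a h => min a (pvRuleIdx ["pencil", "ink", "water", "paint"] h)) 4 with hbest
  have hlen : (["pencil", "ink", "water", "paint"] : List String).length = 4 := rfl
  have hble : best ≤ 4 := by
    have := pvFold_le_acc ["pencil", "ink", "water", "paint"] hs 4
    simpa [hbest] using this
  have hiff : ∀ k, k < 4 → ((best ≤ k) ↔ ∃ h ∈ hs, pvRuleIdx ["pencil", "ink", "water", "paint"] h ≤ k) := by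
    intro k hk
    have := pvFold_le_iff ["pencil", "ink", "water", "paint"] hs k (by rw [hlen]; omega)
    rw [hlen] at this
    exact this
  have hcond : ∀ (p : String), (∃ h ∈ hs, PySem.Str.isIn p h = true)
      ↔ ((tags.map (fun t => PySem.Str.lower t)).any (fun t => PySem.Str.isIn p t) || PySem.Str.isIn p nl) = true := by
    intro p
    simp only [hhs, Bool.or_eq_true, List.any_eq_true, List.mem_append, List.mem_singleton]
    constructor
    · rintro ⟨h, (hm | rfl), hPh⟩
      · exact Or.inl ⟨h, hm, hPh⟩
      · exact Or.inr hPh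
    · rintro (⟨h, hm, hPh⟩ | hPh)
      · exact ⟨h, Or.inl hm, hPh⟩
      · exact ⟨nl, Or.inr rfl, hPh⟩
  by_cases hp : ∃ h ∈ hs, PySem.Str.isIn "pencil" h = true
  · have hb0 : best ≤ 0 := (hiff 0 (by omega)).mpr (by
      obtain ⟨h, hm, hh⟩ := hp
      exact ⟨h, hm, (pvIdx1_le_iff h 0 (by omega)).mpr (Or.inl hh)⟩)
    have hb : best = 0 := by omega
    rw [if_pos ((hcond "pencil").mp hp), hb]
    rfl
  · by_cases hi : ∃ h ∈ hs, PySem.Str.isIn "ink" h = true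
    · have hb1 : best ≤ 1 := (hiff 1 (by omega)).mpr (by
        obtain ⟨h, hm, hh⟩ := hi
        exact ⟨h, hm, (pvIdx1_le_iff h 1 (by omega)).mpr (Or.inr (Or.inl ⟨le_refl 1, hh⟩))⟩)
      have hnb0 : ¬ best ≤ 0 := by
        intro hc
        obtain ⟨h, hm, hh⟩ := (hiff 0 (by omega)).mp hc
        rcases (pvIdx1_le_iff h 0 (by omega)).mp hh with h1 | ⟨h2, _⟩ | ⟨h2, _⟩ | ⟨h2, _⟩
        · exact hp ⟨h, hm, h1⟩
        all_goals omega
      have hb : best = 1 := by omega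
      rw [if_neg (fun hc => hp ((hcond "pencil").mpr hc)),
          if_pos ((hcond "ink").mp hi), hb]
      rfl
    · by_cases hw : ∃ h ∈ hs, PySem.Str.isIn "water" h = true
      · have hb2 : best ≤ 2 := (hiff 2 (by omega)).mpr (by
          obtain ⟨h, hm, hh⟩ := hw
          exact ⟨h, hm, (pvIdx1_le_iff h 2 (by omega)).mpr (Or.inr (Or.inr (Or.inl ⟨by omega, hh⟩)))⟩)
        have hnb1 : ¬ best ≤ 1 := by
          intro hc
          obtain ⟨h, hm, hh⟩ := (hiff 1 (by omega)).mp hc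
          rcases (pvIdx1_le_iff h 1 (by omega)).mp hh with h1 | ⟨_, h1⟩ | ⟨h2, _⟩ | ⟨h2, _⟩
          · exact hp ⟨h, hm, h1⟩
          · exact hi ⟨h, hm, h1⟩
          all_goals omega
        have hb : best = 2 := by omega
        rw [if_neg (fun hc => hp ((hcond "pencil").mpr hc)),
            if_neg (fun hc => hi ((hcond "ink").mpr hc)),
            if_pos ((hcond "water").mp hw), hb]
        rfl
      · by_cases hpa : ∃ h ∈ hs, PySem.Str.isIn "paint" h = true
        · have hb3 : best ≤ 3 := (hiff 3 (by omega)).mpr (by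
            obtain ⟨h, hm, hh⟩ := hpa
            exact ⟨h, hm, (pvIdx1_le_iff h 3 (by omega)).mpr (Or.inr (Or.inr (Or.inr ⟨by omega, hh⟩)))⟩)
          have hnb2 : ¬ best ≤ 2 := by
            intro hc
            obtain ⟨h, hm, hh⟩ := (hiff 2 (by omega)).mp hc
            rcases (pvIdx1_le_iff h 2 (by omega)).mp hh with h1 | ⟨_, h1⟩ | ⟨_, h1⟩ | ⟨h2, _⟩
            · exact hp ⟨h, hm, h1⟩
            · exact hi ⟨h, hm, h1⟩
            · exact hw ⟨h, hm, h1⟩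
            · omega
          have hb : best = 3 := by omega
          rw [if_neg (fun hc => hp ((hcond "pencil").mpr hc)),
              if_neg (fun hc => hi ((hcond "ink").mpr hc)),
              if_neg (fun hc => hw ((hcond "water").mpr hc)),
              if_pos ((hcond "paint").mp hpa), hb]
          rfl
        · have hnb3 : ¬ best ≤ 3 := by
            intro hc
            obtain ⟨h, hm, hh⟩ := (hiff 3 (by omega)).mp hc
            rcases (pvIdx1_le_iff h 3 (by omega)).mp hh with h1 | ⟨_, h1⟩ | ⟨_, h1⟩ | ⟨_, h1⟩
            · exact hp ⟨h, hm, h1⟩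
            · exact hi ⟨h, hm, h1⟩
            · exact hw ⟨h, hm, h1⟩
            · exact hpa ⟨h, hm, h1⟩
          have hb : best = 4 := by omega
          rw [if_neg (fun hc => hp ((hcond "pencil").mpr hc)),
              if_neg (fun hc => hi ((hcond "ink").mpr hc)),
              if_neg (fun hc => hw ((hcond "water").mpr hc)),
              if_neg (fun hc => hpa ((hcond "paint").mpr hc)), hb,
              if_neg (by omega : ¬ (4 : Nat) < 4)]
          simp only [pvRuleIdx]
          split_ifs <;> rfl
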